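-- pv_equiv track=rewrite | github.com/jzlandis/adventofcode2020 | python_solns/day06.py | groups2sets2
-- ===== SOURCE A (Python) =====
-- def groups2sets2(groups):
--     for group in groups:
--         sets = []
--         for answers in group:
--             sets.append(set(answers))
--         super_set = sets[0]
--         for s in sets[1:]:
--             super_set = super_set.intersection(s)
--         yield super_set
-- ===== SOURCE B (Python) =====
-- def groups2sets2(groups):
--     for group in groups:
--         members = [set(answers) for answers in group]
--         base = members[0]
--         rest = members[1:]
--         counts = {}
--         for m in rest:
--             for a in m:
--                 counts[a] = counts.get(a, 0) + 1
--         yield {a for a in base if counts.get(a, 0) == len(rest)}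
-- ===== Notes on version B (the rewrite author's own statement) =====
-- stated objective: alternative
-- what changed: Replaces the repeated set.intersection fold with a single count table over the non-first members plus a threshold filter of the first member's set.
import Mathlib
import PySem

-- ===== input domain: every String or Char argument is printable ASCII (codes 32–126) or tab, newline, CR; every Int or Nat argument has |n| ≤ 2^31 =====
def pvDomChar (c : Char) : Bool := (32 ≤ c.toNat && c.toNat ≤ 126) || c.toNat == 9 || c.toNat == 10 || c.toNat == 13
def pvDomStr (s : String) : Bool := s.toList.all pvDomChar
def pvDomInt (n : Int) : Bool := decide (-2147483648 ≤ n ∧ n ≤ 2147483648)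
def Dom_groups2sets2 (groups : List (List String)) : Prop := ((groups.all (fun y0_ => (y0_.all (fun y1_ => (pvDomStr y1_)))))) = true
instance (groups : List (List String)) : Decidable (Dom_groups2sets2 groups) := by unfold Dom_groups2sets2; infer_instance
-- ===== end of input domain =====

-- B replaces A's repeated set-intersection fold with one count table over the non-first
-- members and a threshold filter of the first member's set (objective: alternative).
-- Pre_ excludes inputs containing an empty group, on which both A and B raise IndexError.


-- ===== PORT A =====
-- set(answers): the set of one-character strings of the string `answers`
def pvChars (answers : String) : PySem.Set String :=
  PySem.Set.ofList (answers.toList.map (fun c => String.ofList [c]))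

def groups2sets2 (groups : List (List String)) : List (List String) :=
  groups.map (fun group =>
    let sets : List (PySem.Set String) := group.foldl (fun acc answers => acc ++ [pvChars answers]) []
    match sets with
    | [] => []  -- sets[0] raises IndexError in Python; unreachable under Pre_
    | s0 :: rest => rest.foldl (fun superSet s => PySem.Set.inter superSet s) s0)

-- ===== PORT B =====
def groups2sets2_alt (groups : List (List String)) : List (List String) :=
  groups.map (fun group =>
    let members : List (PySem.Set String) := group.map (fun answers => pvChars answers)
    match members with
    | [] => []  -- members[0] raises IndexError in Python; unreachable under Pre_
    | base :: rest =>
      let counts : PySem.Dict String Int :=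
        rest.foldl (fun d m => m.foldl (fun d a => d.modify a 0 (· + 1)) d) PySem.Dict.empty
      PySem.Set.ofList (base.filter (fun a => counts.getD a 0 == (rest.length : Int))))

-- ===== PRECONDITION & SPEC =====
-- Pre_ excludes exactly the inputs containing an empty group, where A raises IndexError (sets[0]).
def Pre_groups2sets2 (groups : List (List String)) : Prop := ∀ g ∈ groups, g ≠ []
instance (groups : List (List String)) : Decidable (Pre_groups2sets2 groups) := by unfold Pre_groups2sets2; infer_instance

def pvWitness_groups2sets2 : List (List String) := [["abc", "bcd", "cb"], ["x"]]

def Spec_groups2sets2 (groups : List (List String)) (out : List (List String)) : Prop := out = groups2sets2_alt groups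
instance (groups : List (List String)) (out : List (List String)) : Decidable (Spec_groups2sets2 groups out) := by unfold Spec_groups2sets2; infer_instance

-- ===== CLAIM (what is proved, stated in full; the proofs are below) =====
def Claim_equal_groups2sets2 : Prop := ∀ (groups : List (List String)), Dom_groups2sets2 groups → Pre_groups2sets2 groups → Spec_groups2sets2 groups (groups2sets2 groups)

-- ===== LEMMAS AND PROOFS =====

theorem foldl_append_singleton {A B : Type} (f : A → B) (l : List A) (acc : List B) :
    l.foldl (fun acc x => acc ++ [f x]) acc = acc ++ l.map f := by
  induction l generalizing acc with
  | nil => simp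
  | cons x l ih => simp [ih]

-- A's fold of intersections = filter of the base by membership in every later set
theorem foldl_inter_eq_filter (rest : List (PySem.Set String)) (base : List String) :
    rest.foldl (fun superSet s => PySem.Set.inter superSet s) base
      = base.filter (fun a => rest.all (fun s => PySem.Set.contains s a)) := by
  induction rest generalizing base with
  | nil => simp
  | cons s rest ih =>
      rw [List.foldl_cons, ih]
      simp only [PySem.Set.inter, List.filter_filter, List.all_cons]
      congr 1
      funext a
      rw [Bool.and_comm]

-- the nested counting loop: counts.getD a 0 = number of later (nodup) member sets containing a
theorem counts_getD (rest : List (PySem.Set String)) (hnd : ∀ m ∈ rest, m.Nodup)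
    (d : PySem.Dict String Int) (a : String) :
    (rest.foldl (fun d m => m.foldl (fun d a => d.modify a 0 (· + 1)) d) d).getD a 0
      = d.getD a 0 + (rest.countP (fun m => PySem.Set.contains m a) : Int) := by
  induction rest generalizing d with
  | nil => simp
  | cons m rest ih =>
      simp only [List.foldl_cons, List.countP_cons]
      rw [ih (fun x hx => hnd x (List.mem_cons_of_mem _ hx)),
          PySem.Dict.getD_foldl_modify_add_one]
      have hm : m.Nodup := hnd m (List.mem_cons_self ..)
      have : m.count a = if PySem.Set.contains m a then 1 else 0 := by
        by_cases h : a ∈ m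
        · simp [List.count_eq_one_of_mem hm h, h]
        · simp [List.count_eq_zero_of_not_mem h, h]
      rw [this]
      split_ifs <;> push_cast <;> ring

theorem per_group_eq (group : List String) :
    (let sets : List (PySem.Set String) := group.foldl (fun acc answers => acc ++ [pvChars answers]) []
     match sets with
     | [] => ([] : List String)
     | s0 :: rest => rest.foldl (fun superSet s => PySem.Set.inter superSet s) s0)
    = (let members : List (PySem.Set String) := group.map (fun answers => pvChars answers)
       match members with
       | [] => ([] : List String)
       | base :: rest =>
         let counts : PySem.Dict String Int :=
           rest.foldl (fun d m => m.foldl (fun d a => d.modify a 0 (· + 1)) d) PySem.Dict.empty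
         PySem.Set.ofList (base.filter (fun a => counts.getD a 0 == (rest.length : Int)))) := by
  have hsets : group.foldl (fun acc answers => acc ++ [pvChars answers]) []
      = group.map (fun answers => pvChars answers) := by
    simpa using foldl_append_singleton (fun answers => pvChars answers) group []
  simp only [hsets]
  cases hg : group.map (fun answers => pvChars answers) with
  | nil => rfl
  | cons base rest =>
      simp only []
      have hnd : ∀ m ∈ base :: rest, m.Nodup := by
        intro m hm
        have : m ∈ group.map (fun answers => pvChars answers) := hg ▸ hm
        obtain ⟨s, _, rfl⟩ := List.mem_map.mp this
        exact PySem.Set.nodup_ofList _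
      have hbase : base.Nodup := hnd base (List.mem_cons_self ..)
      rw [foldl_inter_eq_filter]
      rw [PySem.Set.ofList_eq_self_of_nodup _ (hbase.filter _)]
      congr 1
      funext a
      rw [counts_getD rest (fun m hm => hnd m (List.mem_cons_of_mem _ hm)) PySem.Dict.empty a]
      simp only [PySem.Dict.getD_empty, Int.zero_add]
      simp only [PySem.Set.contains_eq_listContains, List.contains_eq_mem]
      by_cases hall : ∀ m ∈ rest, a ∈ m
      · have hcnt : List.countP (fun s => decide (a ∈ s)) rest = rest.length :=
          List.countP_eq_length.mpr (fun m hm => by simpa using hall m hm)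
        have h1 : (rest.all fun s => decide (a ∈ s)) = true :=
          List.all_eq_true.mpr (fun m hm => by simpa using hall m hm)
        rw [h1, hcnt]
        simp
      · simp only [not_forall] at hall
        obtain ⟨m, hm, hma⟩ := hall
        have h1 : (rest.all fun s => decide (a ∈ s)) = false :=
          List.all_eq_false.mpr ⟨m, hm, by simpa using hma⟩
        have hlt : List.countP (fun s => decide (a ∈ s)) rest < rest.length := by
          rcases lt_or_eq_of_le (List.countP_le_length (p := fun s => decide (a ∈ s)) (l := rest)) with h | h
          · exact h
          · exact absurd (by simpa using List.countP_eq_length.mp h m hm) hma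
        have hne' : ((List.countP (fun s => decide (a ∈ s)) rest : Int)) ≠ (rest.length : Int) := by
          exact_mod_cast Nat.ne_of_lt hlt
        rw [h1]
        simp [hne']

-- ===== VERDICT (by name: the statement is the Claim_ definition above) =====
theorem groups2sets2_spec : Claim_equal_groups2sets2 := by
  intro groups _ _
  unfold Spec_groups2sets2 groups2sets2 groups2sets2_alt
  apply List.map_congr_left
  intro group _
  exact per_group_eq group
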